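-- pv_equiv track=rewrite | github.com/JackieMaw/AdventOfCode | python/2023/2023day12b_clever_brute_force.py | split_by_max_num
-- ===== SOURCE A (Python) =====
-- def split_by_max_num(condition_summary_chunks, max_num):
--     all_groups_of_chunks = []
--
--     accumulated_chunks = []
--     for chunk in condition_summary_chunks:
--         if chunk == max_num:
--             all_groups_of_chunks.append(accumulated_chunks)
--             accumulated_chunks = []
--             all_groups_of_chunks.append([chunk]) # add the max as it's own group
--         else:
--             accumulated_chunks.append(chunk)
--
--     if len(accumulated_chunks) > 0:
--         all_groups_of_chunks.append(accumulated_chunks)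
--
--     return all_groups_of_chunks
-- ===== SOURCE B (Python) =====
-- def split_by_max_num(condition_summary_chunks, max_num):
--     # Different decomposition: repeatedly find the next max with .index and slice,
--     # instead of a single accumulator pass.
--     groups = []
--     rest = condition_summary_chunks
--     while max_num in rest:
--         i = rest.index(max_num)
--         groups.append(rest[:i])
--         groups.append([max_num])
--         rest = rest[i+1:]
--     if rest:
--         groups.append(rest)
--     return groups
-- ===== Notes on version B (the rewrite author's own statement) =====
-- stated objective: alternative
-- what changed: Replaces A's single accumulator pass with a find-and-slice loop: repeatedly locate the next max_num with list.index, emit the slice before it and [max_num], and continue on the slice after it; the trailing slice is appended only if non-empty.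
import Mathlib
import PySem

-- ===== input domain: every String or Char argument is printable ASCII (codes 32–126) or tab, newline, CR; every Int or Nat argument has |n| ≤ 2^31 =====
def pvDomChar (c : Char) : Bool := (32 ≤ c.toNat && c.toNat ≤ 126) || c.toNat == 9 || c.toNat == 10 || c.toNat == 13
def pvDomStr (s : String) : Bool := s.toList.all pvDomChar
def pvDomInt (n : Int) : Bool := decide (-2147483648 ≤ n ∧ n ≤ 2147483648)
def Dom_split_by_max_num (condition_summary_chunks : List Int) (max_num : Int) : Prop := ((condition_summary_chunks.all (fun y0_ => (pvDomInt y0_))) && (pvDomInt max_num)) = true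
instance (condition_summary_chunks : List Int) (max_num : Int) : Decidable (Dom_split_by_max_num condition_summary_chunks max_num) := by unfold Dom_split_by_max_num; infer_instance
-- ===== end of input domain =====

-- B replaces A's single accumulator pass with a find-and-slice loop (list.index + slicing); alternative decomposition, same cost.


-- ===== PORT A =====
-- one pass with an accumulator, as in A
def split_by_max_num (condition_summary_chunks : List Int) (max_num : Int) : List (List Int) :=
  let st := condition_summary_chunks.foldl
    (fun (s : List (List Int) × List Int) chunk =>
      if chunk = max_num then (s.1 ++ [s.2] ++ [[chunk]], [])
      else (s.1, s.2 ++ [chunk]))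
    ([], [])
  if st.2.length > 0 then st.1 ++ [st.2] else st.1

-- ===== PORT B =====
-- Source B's while-loop: 'while max_num in rest', find it with .index (always succeeds under the
-- membership guard, so index? is totalised with getD 0), slice off the piece before it and the max itself
def split_by_max_num_alt_loop (max_num : Int) (groups : List (List Int)) (rest : List Int) : List (List Int) :=
  if hmem : max_num ∈ rest then
    let i : Nat := (PySem.List.index? rest max_num).getD 0
    split_by_max_num_alt_loop max_num
      (groups ++ [PySem.List.slice rest none (some (i : Int)), [max_num]])
      (PySem.List.slice rest (some ((i : Int) + 1)) none)
  else if rest ≠ [] then groups ++ [rest] else groups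
termination_by rest.length
decreasing_by
  obtain ⟨k, hk⟩ := Option.isSome_iff_exists.1 ((PySem.List.index?_isSome_iff rest max_num).2 hmem)
  obtain ⟨hklt, -, -⟩ := PySem.List.getElem_of_index?_eq_some hk
  simp only [hk, Option.getD_some]
  rw [show ((k : Int) + 1) = ((k + 1 : Nat) : Int) by push_cast; ring,
      PySem.List.slice_from_natCast]
  simp only [List.length_drop]
  omega

def split_by_max_num_alt (condition_summary_chunks : List Int) (max_num : Int) : List (List Int) :=
  split_by_max_num_alt_loop max_num [] condition_summary_chunks

-- ===== PRECONDITION & SPEC =====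
def Spec_split_by_max_num (condition_summary_chunks : List Int) (max_num : Int) (out : List (List Int)) : Prop := out = split_by_max_num_alt condition_summary_chunks max_num
instance (condition_summary_chunks : List Int) (max_num : Int) (out : List (List Int)) : Decidable (Spec_split_by_max_num condition_summary_chunks max_num out) := by unfold Spec_split_by_max_num; infer_instance

-- ===== CLAIM (what is proved, stated in full; the proofs are below) =====
def Claim_equal_split_by_max_num : Prop := ∀ (condition_summary_chunks : List Int) (max_num : Int), Dom_split_by_max_num condition_summary_chunks max_num → Spec_split_by_max_num condition_summary_chunks max_num (split_by_max_num condition_summary_chunks max_num)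

-- ===== LEMMAS AND PROOFS =====

-- A's step function, named so the lemmas can speak about it (definitionally A's lambda)
def stepA (m : Int) (s : List (List Int) × List Int) (chunk : Int) : List (List Int) × List Int :=
  if chunk = m then (s.1 ++ [s.2] ++ [[chunk]], []) else (s.1, s.2 ++ [chunk])

theorem A_eq_stepA (xs : List Int) (m : Int) :
    split_by_max_num xs m =
      (if (xs.foldl (stepA m) ([], [])).2.length > 0
       then (xs.foldl (stepA m) ([], [])).1 ++ [(xs.foldl (stepA m) ([], [])).2]
       else (xs.foldl (stepA m) ([], [])).1) := rfl

-- folding A's step over an m-free list only grows the accumulator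
theorem foldA_mfree (m : Int) (pre : List Int) (hm : m ∉ pre) (gs : List (List Int)) (acc : List Int) :
    pre.foldl (stepA m) (gs, acc) = (gs, acc ++ pre) := by
  induction pre generalizing acc with
  | nil => simp
  | cons x xs ih =>
      simp only [List.mem_cons, not_or] at hm
      simp only [List.foldl_cons, stepA]
      rw [if_neg (Ne.symm hm.1), ih hm.2]
      simp
  
-- the groups component is only appended to: factor the initial groups out
theorem foldA_shift (m : Int) (xs : List Int) (gs : List (List Int)) (acc : List Int) :
    xs.foldl (stepA m) (gs, acc) =
      (gs ++ (xs.foldl (stepA m) ([], acc)).1, (xs.foldl (stepA m) ([], acc)).2) := by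
  induction xs generalizing gs acc with
  | nil => simp
  | cons x xs ih =>
      by_cases hx : x = m
      · simp only [List.foldl_cons, stepA, if_pos hx]
        rw [ih (gs ++ [acc] ++ [[x]]) [], ih ([] ++ [acc] ++ [[x]]) []]
        simp
      · simp only [List.foldl_cons, stepA, if_neg hx]
        rw [ih]

-- A on pre ++ m :: suf with pre m-free: emits pre and [m], then works like A on suf
theorem A_unfold (m : Int) (pre suf : List Int) (hm : m ∉ pre) :
    split_by_max_num (pre ++ m :: suf) m = pre :: [m] :: split_by_max_num suf m := by
  rw [A_eq_stepA, A_eq_stepA]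
  rw [List.foldl_append, foldA_mfree m pre hm, List.foldl_cons,
      show stepA m ([], [] ++ pre) m = ([[] ++ pre, [m]], []) by simp [stepA],
      foldA_shift m suf ([[] ++ pre, [m]]) []]
  split <;> simp

-- A on an m-free list
theorem A_mfree (m : Int) (xs : List Int) (hm : m ∉ xs) :
    split_by_max_num xs m = if xs ≠ [] then [xs] else [] := by
  rw [A_eq_stepA, foldA_mfree m xs hm]
  rcases xs with _ | ⟨y, ys⟩ <;> simp

-- one-step unfoldings of B's loop
theorem loop_mem (m : Int) (gs : List (List Int)) (rest : List Int) (k : Nat)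
    (hmem : m ∈ rest) (hk : PySem.List.index? rest m = some k) :
    split_by_max_num_alt_loop m gs rest =
      split_by_max_num_alt_loop m
        (gs ++ [PySem.List.slice rest none (some (k : Int)), [m]])
        (PySem.List.slice rest (some ((k : Int) + 1)) none) := by
  conv_lhs => rw [split_by_max_num_alt_loop]
  rw [dif_pos hmem]
  simp only [hk, Option.getD_some]

theorem loop_nomem (m : Int) (gs : List (List Int)) (rest : List Int) (hmem : m ∉ rest) :
    split_by_max_num_alt_loop m gs rest = if rest ≠ [] then gs ++ [rest] else gs := by
  conv_lhs => rw [split_by_max_num_alt_loop]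
  rw [dif_neg hmem]

-- B's loop only appends to groups
theorem B_shift (m : Int) (rest : List Int) (gs : List (List Int)) :
    split_by_max_num_alt_loop m gs rest = gs ++ split_by_max_num_alt_loop m [] rest := by
  induction hn : rest.length using Nat.strong_induction_on generalizing rest gs with
  | _ n ih =>
    by_cases hmem : m ∈ rest
    · obtain ⟨k, hk⟩ := Option.isSome_iff_exists.1 ((PySem.List.index?_isSome_iff rest m).2 hmem)
      obtain ⟨hklt, -, -⟩ := PySem.List.getElem_of_index?_eq_some hk
      have hlen : (PySem.List.slice rest (some ((k : Int) + 1)) none).length < n := by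
        rw [show ((k : Int) + 1) = ((k + 1 : Nat) : Int) by push_cast; ring,
            PySem.List.slice_from_natCast]
        simp only [List.length_drop]
        omega
      rw [loop_mem m gs rest k hmem hk, loop_mem m [] rest k hmem hk,
          ih _ hlen _ _ rfl,
          ih _ hlen _ ([] ++ [PySem.List.slice rest none (some (k : Int)), [m]]) rfl]
      simp
    · rw [loop_nomem m gs rest hmem, loop_nomem m [] rest hmem]
      split <;> simp

-- B on pre ++ m :: suf with pre m-free
theorem B_unfold (m : Int) (pre suf : List Int) (hm : m ∉ pre) :
    split_by_max_num_alt (pre ++ m :: suf) m = pre :: [m] :: split_by_max_num_alt suf m := by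
  unfold split_by_max_num_alt
  have hi : PySem.List.index? (pre ++ m :: suf) m = some pre.length := by
    rw [show pre ++ m :: suf = (pre ++ [m]) ++ suf by simp,
        PySem.List.index?_append_of_mem _ (by simp),
        PySem.List.index?_append_singleton_self pre m hm]
  rw [loop_mem m [] (pre ++ m :: suf) pre.length (by simp) hi]
  have h1 : PySem.List.slice (pre ++ m :: suf) none (some (pre.length : Int)) = pre := by
    rw [PySem.List.slice_to_natCast]; simp
  have h2 : PySem.List.slice (pre ++ m :: suf) (some ((pre.length : Int) + 1)) none = suf := by
    rw [show ((pre.length : Int) + 1) = ((pre.length + 1 : Nat) : Int) by push_cast; ring,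
        PySem.List.slice_from_natCast]
    simp [List.drop_append]
  rw [h1, h2, B_shift]
  simp

-- B on an m-free list
theorem B_mfree (m : Int) (xs : List Int) (hm : m ∉ xs) :
    split_by_max_num_alt xs m = if xs ≠ [] then [xs] else [] := by
  unfold split_by_max_num_alt
  rw [loop_nomem m [] xs hm]
  split <;> simp

-- ===== VERDICT (by name: the statement is the Claim_ definition above) =====
theorem split_by_max_num_spec : Claim_equal_split_by_max_num := by
  intro xs m hd
  clear hd
  unfold Spec_split_by_max_num
  induction hn : xs.length using Nat.strong_induction_on generalizing xs with
  | _ n ih =>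
    by_cases hm : m ∈ xs
    · obtain ⟨k, hk⟩ := Option.isSome_iff_exists.1 ((PySem.List.index?_isSome_iff xs m).2 hm)
      obtain ⟨pre, suf, hx, hlen, hpre⟩ := (PySem.List.index?_eq_some_iff _ _ _).1 hk
      subst hx
      rw [A_unfold m pre suf hpre, B_unfold m pre suf hpre,
          ih suf.length (by simp at hn; omega) suf rfl]
    · rw [A_mfree m xs hm, B_mfree m xs hm]
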